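-- pv_equiv track=rewrite | github.com/josefeneto/getmyhouse | src/utils.py | group_properties_by_typology
-- ===== SOURCE A (Python) =====
-- from typing import Any, Dict, List, Optional, Union
--
-- def group_properties_by_typology(
--     properties: List[Dict[str, Any]]
-- ) -> Dict[str, List[Dict[str, Any]]]:
--     """
--     Group properties by typology.
--
--     Args:
--         properties: List of property dictionaries
--
--     Returns:
--         Dictionary mapping typology to list of properties
--     """
--     groups = {}
--
--     for prop in properties:
--         typology = prop.get("typology", "Unknown")
--         if typology not in groups:
--             groups[typology] = []
--         groups[typology].append(prop)
--
--     return groups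
-- ===== SOURCE B (Python) =====
-- from typing import Any, Dict, List
--
--
-- def group_properties_by_typology(
--     properties: List[Dict[str, Any]]
-- ) -> Dict[str, List[Dict[str, Any]]]:
--     """Group properties by typology: distinct typologies in first-occurrence
--     order, each mapped to the sub-list of properties with that typology."""
--     key = lambda p: p.get("typology", "Unknown")
--     typologies = list(dict.fromkeys(key(p) for p in properties))
--     return {t: [p for p in properties if key(p) == t] for t in typologies}
-- ===== Notes on version B (the rewrite author's own statement) =====
-- stated objective: idiomatic
-- what changed: B replaces A's single mutating accumulation loop with a declarative two-phase build: an ordered dedup of the typologies (dict.fromkeys) followed by a per-typology filter comprehension.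
import Mathlib
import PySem

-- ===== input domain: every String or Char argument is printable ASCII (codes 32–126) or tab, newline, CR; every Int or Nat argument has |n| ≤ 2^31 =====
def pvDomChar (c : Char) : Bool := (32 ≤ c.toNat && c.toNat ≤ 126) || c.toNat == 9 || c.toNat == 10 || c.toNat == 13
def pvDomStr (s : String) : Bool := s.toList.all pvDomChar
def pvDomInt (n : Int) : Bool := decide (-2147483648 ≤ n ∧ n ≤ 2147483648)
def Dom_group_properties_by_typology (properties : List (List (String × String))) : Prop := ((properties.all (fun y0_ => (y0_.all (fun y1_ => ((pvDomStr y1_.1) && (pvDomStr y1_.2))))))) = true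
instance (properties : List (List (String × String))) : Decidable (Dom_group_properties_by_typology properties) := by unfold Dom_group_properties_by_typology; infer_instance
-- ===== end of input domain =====

-- B replaces A's single mutating accumulation loop with a declarative two-phase build
-- (ordered dedup of the typologies, then one filter per typology); objective: idiomatic, not faster.

-- shared helper: prop.get("typology", "Unknown") on the association-list representation of the dict
def pvTyp (p : List (String × String)) : String :=
  (PySem.Dict.mk p).getD "typology" "Unknown"

-- ===== PORT A =====
def group_properties_by_typology (properties : List (List (String × String))) : List (String × List (List (String × String))) :=
  (properties.foldl
    (fun groups prop =>
      let typology := pvTyp prop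
      let groups := if groups.contains typology then groups
                    else groups.insert typology ([] : List (List (String × String)))
      groups.modify typology [] (fun v => v ++ [prop]))
    PySem.Dict.empty).items

-- ===== PORT B =====
def group_properties_by_typology_alt (properties : List (List (String × String))) : List (String × List (List (String × String))) :=
  (PySem.List.dedup (properties.map pvTyp)).map
    (fun t => (t, properties.filter (fun p => pvTyp p == t)))

-- ===== PRECONDITION & SPEC =====
def Spec_group_properties_by_typology (properties : List (List (String × String))) (out : List (String × List (List (String × String)))) : Prop := out = group_properties_by_typology_alt properties
instance (properties : List (List (String × String))) (out : List (String × List (List (String × String)))) : Decidable (Spec_group_properties_by_typology properties out) := by unfold Spec_group_properties_by_typology; infer_instance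

-- ===== CLAIM (what is proved, stated in full; the proofs are below) =====
def Claim_equal_group_properties_by_typology : Prop := ∀ (properties : List (List (String × String))), Dom_group_properties_by_typology properties → Spec_group_properties_by_typology properties (group_properties_by_typology properties)

-- ===== LEMMAS AND PROOFS =====

-- A's "if absent, insert []; then append" step is exactly a single modify-with-default step
theorem pvStep_eq (g : PySem.Dict String (List (List (String × String)))) (t : String)
    (p : List (String × String)) :
    (if g.contains t then g else g.insert t ([] : List (List (String × String)))).modify t []
        (fun v => v ++ [p])
      = g.modify t [] (fun v => v ++ [p]) := by
  by_cases h : g.contains t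
  · simp [h]
  · have h' : g.contains t = false := by simpa using h
    simp only [h', Bool.false_eq_true, if_false]
    simp only [PySem.Dict.modify, PySem.Dict.insert_insert_self]
    rw [PySem.Dict.getD_insert_self, PySem.Dict.getD_of_not_contains g _ h']

-- ===== VERDICT (by name: the statement is the Claim_ definition above) =====
theorem group_properties_by_typology_spec : Claim_equal_group_properties_by_typology := by
  intro properties _
  unfold Spec_group_properties_by_typology
  unfold group_properties_by_typology group_properties_by_typology_alt
  -- collapse A's loop body to one modify step
  simp only [pvStep_eq]
  -- view A's loop as a fold over (typology, prop) pairs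
  have hfold :
      (properties.foldl
        (fun g prop => g.modify (pvTyp prop) [] (fun v => v ++ [prop]))
        PySem.Dict.empty)
      = ((properties.map (fun p => (pvTyp p, p))).foldl
        (fun d p => d.modify p.1 [] fun x => x ++ [p.2])
        PySem.Dict.empty) := by
    rw [List.foldl_map]
  rw [hfold]
  set d := ((properties.map (fun p => (pvTyp p, p))).foldl
        (fun d p => d.modify p.1 [] fun x => x ++ [p.2])
        PySem.Dict.empty) with hd
  have hnd : d.keys.Nodup := by
    rw [hd]
    exact PySem.Dict.nodup_keys_foldl_modify_key
      (properties.map (fun p => (pvTyp p, p)))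
      (fun q : String × List (String × String) => q.1) []
      (fun _ q => (fun x => x ++ [q.2])) PySem.Dict.empty (by simp)
  have hkeys : d.keys = PySem.List.dedup (properties.map pvTyp) := by
    rw [hd]
    have := PySem.Dict.keys_foldl_modify_key
      (properties.map (fun p => (pvTyp p, p))) (fun q => q.1) []
      (fun _ q => (fun x => x ++ [q.2])) PySem.Dict.empty
    simpa [PySem.List.dedup_eq_ofList, PySem.Set.update, PySem.Set.ofList,
      List.map_map, Function.comp_def] using this
  have hgetD : ∀ t : String,
      d.getD t [] = properties.filter (fun p => pvTyp p == t) := by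
    intro t
    rw [hd, PySem.Dict.getD_foldl_modify_append, PySem.Dict.getD_empty]
    rw [List.filter_map, List.map_map]
    simp [Function.comp_def]
  rw [PySem.Dict.items_eq_map_keys d hnd [], hkeys]
  exact List.map_congr_left (fun t _ => by rw [hgetD t])
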